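-- pv_equiv track=rewrite | github.com/RichardHtunn/Introduction_to_programming_KMITL-Python- | Function/two.py | sortAvoidNegativeNum
-- ===== SOURCE A (Python) =====
-- def bubbleSort(arr):
--     n = len(arr)
--     for i in range(n):
--         for j in range(0, n-i-1):
--             if arr[j] > arr[j+1]:
--                 arr[j],arr[j+1] = arr[j+1], arr[j]
--     return arr
--
-- def sortAvoidNegativeNum(arr):
--     positives = []
--     for p in arr:
--         if p >= 0:
--             positives.append(p)
--
--     positives = bubbleSort(positives)
--
--     result = []
--     position = 0
--     for num in arr:
--         if num < 0:
--             result.append(num)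
--         else:
--             result.append(positives[position])
--             position += 1
--     return result
-- ===== SOURCE B (Python) =====
-- def sortAvoidNegativeNum(arr):
--     # Online insertion: build the result in one pass; each non-negative element is
--     # inserted directly into the (already sorted) non-negative slots of the result
--     # built so far, shifting larger values one non-negative slot to the right.
--     res = []
--     for x in arr:
--         if x < 0:
--             res.append(x)
--         else:
--             nxt = []
--             cur = x
--             for y in res:
--                 if y >= 0 and y > cur:
--                     nxt.append(cur)
--                     cur = y
--                 else:
--                     nxt.append(y)
--             nxt.append(cur)
--             res = nxt
--     return res
-- ===== Notes on version B (the rewrite author's own statement) =====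
-- stated objective: alternative
-- what changed: Replaces A's three-stage pipeline (partition out non-negatives, bubble-sort them, merge back with a position counter) by a single online pass: each non-negative element is inserted directly into the already-sorted non-negative slots of the result built so far, shifting larger values one non-negative slot right (an online insertion sort through the output; no separate value list, no counter).
import Mathlib
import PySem

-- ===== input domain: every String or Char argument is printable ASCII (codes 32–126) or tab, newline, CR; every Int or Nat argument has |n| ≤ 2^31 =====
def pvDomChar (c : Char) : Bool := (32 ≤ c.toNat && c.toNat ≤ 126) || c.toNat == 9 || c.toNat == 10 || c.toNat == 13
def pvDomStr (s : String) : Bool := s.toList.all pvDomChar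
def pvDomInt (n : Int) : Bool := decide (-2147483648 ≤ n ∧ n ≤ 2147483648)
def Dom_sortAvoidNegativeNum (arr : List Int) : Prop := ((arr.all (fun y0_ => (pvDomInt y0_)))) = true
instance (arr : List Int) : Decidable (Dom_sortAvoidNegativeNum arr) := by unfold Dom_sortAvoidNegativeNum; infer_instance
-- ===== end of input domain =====

-- B replaces A's three-stage partition / bubble-sort / merge-back pipeline with a single
-- online pass inserting each non-negative element into the result built so far (objective: alternative).

-- ===== PORT A =====
-- bubbleSort: nested index loops; all indices j, j+1 are < len(arr) (j < n-i-1 ≤ n-1), so the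
-- total pyGetD/pySetD forms are exact here. Python's simultaneous swap reads both olds first.
def bubbleSortA (arr : List Int) : List Int :=
  (PySem.List.pyRange 0 (arr.length : Int) 1).foldl (fun a i =>
    (PySem.List.pyRange 0 ((arr.length : Int) - i - 1) 1).foldl (fun b j =>
      let x := PySem.List.pyGetD b j 0
      let y := PySem.List.pyGetD b (j + 1) 0
      if x > y then PySem.List.pySetD (PySem.List.pySetD b j y) (j + 1) x else b) a) arr

-- positives[position] is always in range (position counts the non-negatives already consumed),
-- so pyGetD with default 0 is exact.
def sortAvoidNegativeNum (arr : List Int) : List Int :=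
  let positives := arr.foldl (fun acc p => if p ≥ 0 then acc ++ [p] else acc) []
  let positives := bubbleSortA positives
  let st := arr.foldl (fun (st : List Int × Int) num =>
      if num < 0 then (st.1 ++ [num], st.2)
      else (st.1 ++ [PySem.List.pyGetD positives st.2 0], st.2 + 1)) ([], 0)
  st.1

-- ===== PORT B =====
-- inner loop of B: walk res carrying cur, shifting larger non-negative values right;
-- the trailing nxt.append(cur) is the base case.
def insNN : List Int → Int → List Int
  | [], cur => [cur]
  | y :: t, cur => if 0 ≤ y ∧ cur < y then cur :: insNN t y else y :: insNN t cur

def sortAvoidNegativeNum_alt (arr : List Int) : List Int :=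
  arr.foldl (fun res x => if x < 0 then res ++ [x] else insNN res x) []

-- ===== PRECONDITION & SPEC =====
def Spec_sortAvoidNegativeNum (arr : List Int) (out : List Int) : Prop := out = sortAvoidNegativeNum_alt arr
instance (arr : List Int) (out : List Int) : Decidable (Spec_sortAvoidNegativeNum arr out) := by unfold Spec_sortAvoidNegativeNum; infer_instance

-- ===== CLAIM (what is proved, stated in full; the proofs are below) =====
def Claim_equal_sortAvoidNegativeNum : Prop := ∀ (arr : List Int), Dom_sortAvoidNegativeNum arr → Spec_sortAvoidNegativeNum arr (sortAvoidNegativeNum arr)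

-- ===== LEMMAS AND PROOFS =====

-- common closed form both programs are reduced to: fill the non-negative slots of arr
-- from the sorted list of its non-negative values
def altConsume : List Int → List Int → List Int
  | [], _ => []
  | x :: t, vals => if x < 0 then x :: altConsume t vals else vals.headI :: altConsume t vals.tail

-- ---------- A-side ----------

-- one Nat-indexed compare-and-swap step of the inner bubble loop
def swapStepN (l : List Int) (j : Nat) : List Int :=
  if l.getD (j + 1) 0 < l.getD j 0 then (l.set j (l.getD (j + 1) 0)).set (j + 1) (l.getD j 0) else l

-- inner loop over Nat indices
def innerF (m : Nat) (a : List Int) : List Int := (List.range m).foldl swapStepN a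

-- structural form of one bounded bubble pass
def bpass : Nat → List Int → List Int
  | 0, a => a
  | _ + 1, [] => []
  | _ + 1, [x] => [x]
  | m + 1, x :: y :: t => if y < x then y :: bpass m (x :: t) else x :: bpass m (y :: t)

-- structural form of the whole outer loop (bounds len-1, len-2, …, 0)
def bsortN : Nat → List Int → List Int
  | 0, a => a
  | c + 1, a => bsortN c (bpass c a)

theorem swapStepN_cons (c : Int) (t : List Int) (j : Nat) :
    swapStepN (c :: t) (j + 1) = c :: swapStepN t j := by
  simp [swapStepN]
  split <;> rfl

theorem foldl_swapStepN_shift (js : List Nat) (c : Int) (t : List Int) :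
    (js.map (· + 1)).foldl swapStepN (c :: t) = c :: js.foldl swapStepN t := by
  induction js generalizing t with
  | nil => rfl
  | cons j js ih => simp [List.foldl_cons, swapStepN_cons, ih]

theorem innerF_eq_bpass (m : Nat) (a : List Int) (h : m + 1 ≤ a.length) :
    innerF m a = bpass m a := by
  induction m generalizing a with
  | zero => rfl
  | succ m ih =>
    match a with
    | [] => simp at h
    | [x] => simp at h
    | x :: y :: t =>
      have hlen1 : m + 1 ≤ (x :: t).length := by simp at h ⊢; omega
      have hlen2 : m + 1 ≤ (y :: t).length := by simp at h ⊢; omega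
      have hstep : swapStepN (x :: y :: t) 0 = if y < x then y :: x :: t else x :: y :: t := by
        simp [swapStepN]
      unfold innerF
      rw [List.range_succ_eq_map]
      simp only [List.foldl_cons, hstep]
      by_cases hxy : y < x
      · simp only [hxy, if_pos]
        rw [foldl_swapStepN_shift]
        have := ih (a := x :: t) hlen1
        unfold innerF at this
        rw [this]
        simp [bpass, hxy]
      · simp only [hxy, if_neg, not_false_iff]
        rw [foldl_swapStepN_shift]
        have := ih (a := y :: t) hlen2
        unfold innerF at this
        rw [this]
        simp [bpass, hxy]

theorem perm_bpass (m : Nat) (a : List Int) : (bpass m a).Perm a := by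
  induction m generalizing a with
  | zero => exact List.Perm.refl a
  | succ m ih =>
    match a with
    | [] => exact List.Perm.refl _
    | [x] => exact List.Perm.refl _
    | x :: y :: t =>
      simp only [bpass]
      split
      · exact ((ih (x :: t)).cons y).trans (List.Perm.swap x y t)
      · exact (ih (y :: t)).cons x

-- elements of the first m output positions come from the first m+1 input positions
theorem mem_take_bpass (m : Nat) (a : List Int) :
    ∀ x ∈ (bpass m a).take m, x ∈ a.take (m + 1) := by
  induction m generalizing a with
  | zero => intro x hx; simp at hx
  | succ m ih =>
    match a with
    | [] => intro x hx; simp [bpass] at hx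
    | [x] => intro z hz; simp [bpass] at hz; simp [hz]
    | x :: y :: t =>
      intro z hz
      simp only [bpass] at hz
      split at hz
      · rcases (by simpa using hz : z = y ∨ z ∈ (bpass m (x :: t)).take m) with h | h
        · simp [h]
        · have := ih (x :: t) z h
          rcases (by simpa using this : z = x ∨ z ∈ t.take m) with h' | h' <;> simp [h']
      · rcases (by simpa using hz : z = x ∨ z ∈ (bpass m (y :: t)).take m) with h | h
        · simp [h]
        · have := ih (y :: t) z h
          rcases (by simpa using this : z = y ∨ z ∈ t.take m) with h' | h' <;> simp [h']

-- one pass: the sorted suffix grows by one, dominating the input prefix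
theorem bpass_sorted (m : Nat) (a : List Int)
    (h1 : (a.drop (m + 1)).Pairwise (· ≤ ·))
    (h2 : ∀ x ∈ a.take (m + 1), ∀ y ∈ a.drop (m + 1), x ≤ y) :
    ((bpass m a).drop m).Pairwise (· ≤ ·) ∧
      (∀ x ∈ a.take (m + 1), ∀ y ∈ (bpass m a).drop m, x ≤ y) := by
  induction m generalizing a with
  | zero =>
    refine ⟨?_, ?_⟩
    · match a with
      | [] => simp [bpass]
      | x :: t =>
        simp only [bpass, List.drop_zero]
        exact List.pairwise_cons.2 ⟨fun y hy => h2 x (by simp) y (by simpa using hy), by simpa using h1⟩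
    · intro x hx y hy
      match a with
      | [] => simp at hx
      | z :: t =>
        have hx' : x = z := by simpa using hx
        simp only [bpass, List.drop_zero] at hy
        rcases (by simpa using hy : y = z ∨ y ∈ t) with h | h
        · simp [hx', h]
        · exact hx' ▸ h2 z (by simp) y (by simpa using h)
  | succ m ih =>
    match a with
    | [] => exact ⟨by simp [bpass], by intro x hx; simp at hx⟩
    | [x] => exact ⟨by simp [bpass], by intro z hz y hy; simp [bpass] at hy⟩
    | x :: y :: t =>
      by_cases hxy : y < x
      · have hb : bpass (m + 1) (x :: y :: t) = y :: bpass m (x :: t) := by simp [bpass, hxy]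
        have ihh := ih (x :: t)
          (by simpa using h1)
          (by
            intro u hu v hv
            apply h2 u _ v (by simpa using hv)
            rcases (by simpa using hu : u = x ∨ u ∈ t.take m) with h | h <;> simp [h])
        refine ⟨?_, ?_⟩
        · rw [hb]; simpa using ihh.1
        · intro u hu v hv
          rw [hb] at hv
          simp only [List.drop_succ_cons] at hv
          rcases (by simpa using hu : u = x ∨ u = y ∨ u ∈ t.take m) with h | h | h
          · exact h ▸ ihh.2 x (by simp) v hv
          · exact h ▸ le_trans (le_of_lt hxy) (ihh.2 x (by simp) v hv)
          · exact ihh.2 u (by simp [h]) v hv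
      · have hb : bpass (m + 1) (x :: y :: t) = x :: bpass m (y :: t) := by simp [bpass, hxy]
        have ihh := ih (y :: t)
          (by simpa using h1)
          (by
            intro u hu v hv
            apply h2 u _ v (by simpa using hv)
            rcases (by simpa using hu : u = y ∨ u ∈ t.take m) with h | h <;> simp [h])
        refine ⟨?_, ?_⟩
        · rw [hb]; simpa using ihh.1
        · intro u hu v hv
          rw [hb] at hv
          simp only [List.drop_succ_cons] at hv
          rcases (by simpa using hu : u = x ∨ u = y ∨ u ∈ t.take m) with h | h | h
          · exact h ▸ le_trans (not_lt.1 hxy) (ihh.2 y (by simp) v hv)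
          · exact h ▸ ihh.2 y (by simp) v hv
          · exact ihh.2 u (by simp [h]) v hv

-- outer invariant
def InvJ (c : Nat) (a : List Int) : Prop :=
  (a.drop c).Pairwise (· ≤ ·) ∧ ∀ x ∈ a.take c, ∀ y ∈ a.drop c, x ≤ y

theorem invJ_step (c : Nat) (a : List Int) (h : InvJ (c + 1) a) : InvJ c (bpass c a) := by
  obtain ⟨h1, h2⟩ := h
  obtain ⟨s1, s2⟩ := bpass_sorted c a h1 h2
  exact ⟨s1, fun x hx y hy => s2 x (mem_take_bpass c a x hx) y hy⟩

theorem bsortN_sorted (c : Nat) (a : List Int) (h : InvJ c a) : (bsortN c a).Pairwise (· ≤ ·) := by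
  induction c generalizing a with
  | zero => simpa [bsortN] using h.1
  | succ c ih => exact ih (bpass c a) (invJ_step c a h)

theorem perm_bsortN (c : Nat) (a : List Int) : (bsortN c a).Perm a := by
  induction c generalizing a with
  | zero => exact List.Perm.refl a
  | succ c ih => exact (ih (bpass c a)).trans (perm_bpass c a)

theorem length_innerF (m : Nat) (a : List Int) : (innerF m a).length = a.length := by
  unfold innerF
  induction m with
  | zero => rfl
  | succ m ih =>
    rw [List.range_succ, List.foldl_append]
    simp only [List.foldl_cons, List.foldl_nil]
    rw [swapStepN]
    split <;> simp [ih]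

-- the outer Nat-index fold with bounds c-1-k equals bsortN
theorem foldF_eq_bsortN (c : Nat) (a : List Int) (h : c ≤ a.length) :
    (List.range c).foldl (fun l k => innerF (c - 1 - k) l) a = bsortN c a := by
  induction c generalizing a with
  | zero => rfl
  | succ c ih =>
    rw [List.range_succ_eq_map]
    simp only [List.foldl_cons, Nat.sub_zero, Nat.add_sub_cancel]
    rw [List.foldl_map]
    calc (List.range c).foldl (fun l k => innerF (c + 1 - 1 - (k + 1)) l) (innerF c a)
        = (List.range c).foldl (fun l k => innerF (c - 1 - k) l) (innerF c a) := by
          apply PySem.List.foldl_congr_mem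
          intro l k _
          congr 1
          omega
      _ = bsortN c (innerF c a) := ih _ (by rw [length_innerF]; omega)
      _ = bsortN (c + 1) a := by
          rw [innerF_eq_bpass c a (by omega)]
          rfl

-- bubbleSortA computes bsortN over the list's length
theorem bubbleSortA_eq_bsortN (a : List Int) : bubbleSortA a = bsortN a.length a := by
  unfold bubbleSortA
  rw [PySem.List.pyRange_zero_natCast]
  rw [List.foldl_map]
  have hcongr : (List.range a.length).foldl
      (fun b (k : Nat) =>
        (PySem.List.pyRange 0 ((a.length : Int) - (k : Int) - 1) 1).foldl (fun b j =>
          let x := PySem.List.pyGetD b j 0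
          let y := PySem.List.pyGetD b (j + 1) 0
          if x > y then PySem.List.pySetD (PySem.List.pySetD b j y) (j + 1) x else b) b) a
      = (List.range a.length).foldl (fun l k => innerF (a.length - 1 - k) l) a := by
    apply PySem.List.foldl_congr_mem
    intro b k hk
    have hk' : k < a.length := List.mem_range.1 hk
    have hcast : (a.length : Int) - (k : Int) - 1 = ((a.length - 1 - k : Nat) : Int) := by
      push_cast [Nat.cast_sub (by omega : 1 + k ≤ a.length)]
      omega
    rw [hcast, PySem.List.pyRange_zero_natCast, List.foldl_map]
    unfold innerF
    apply PySem.List.foldl_congr_mem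
    intro l j _
    show (let x := PySem.List.pyGetD l (j : Int) 0
          let y := PySem.List.pyGetD l ((j : Int) + 1) 0
          if x > y then PySem.List.pySetD (PySem.List.pySetD l (j : Int) y) ((j : Int) + 1) x else l)
        = swapStepN l j
    have hj1 : ((j : Int) + 1) = ((j + 1 : Nat) : Int) := by push_cast; ring
    simp only [hj1, PySem.List.pyGetD_natCast, PySem.List.pySetD_natCast, swapStepN]
  rw [hcongr, foldF_eq_bsortN a.length a (le_refl _)]

-- A's first loop is List.filter
theorem posfold_eq_filter (arr : List Int) (l : List Int) :
    arr.foldl (fun acc p => if p ≥ 0 then acc ++ [p] else acc) l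
      = l ++ arr.filter (fun x => decide (x ≥ 0)) := by
  induction arr generalizing l with
  | nil => simp
  | cons x t ih =>
    by_cases hx : x ≥ 0
    · rw [List.foldl_cons, if_pos hx, ih (l ++ [x])]
      simp [List.filter_cons, hx]
    · rw [List.foldl_cons, if_neg hx, ih l]
      simp [List.filter_cons, hx]

theorem getD_eq_headI_drop (ps : List Int) (k : Nat) : ps.getD k 0 = (ps.drop k).headI := by
  induction ps generalizing k with
  | nil => simp [List.getD]
  | cons a t ih =>
    cases k with
    | zero => simp [List.getD]
    | succ k => simpa [List.getD_cons_succ] using ih k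

-- A's rebuild loop with a position counter is altConsume on the dropped sorted list
theorem mergefold_eq_altConsume (arr ps acc : List Int) (k : Nat) :
    (arr.foldl (fun (st : List Int × Int) num =>
        if num < 0 then (st.1 ++ [num], st.2)
        else (st.1 ++ [PySem.List.pyGetD ps st.2 0], st.2 + 1)) (acc, (k : Int))).1
      = acc ++ altConsume arr (ps.drop k) := by
  induction arr generalizing acc k with
  | nil => simp [altConsume]
  | cons x t ih =>
    by_cases hx : x < 0
    · simp only [List.foldl_cons, if_pos hx]
      rw [ih (acc ++ [x]) k]
      simp [altConsume, hx]
    · simp only [List.foldl_cons, if_neg hx]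
      have hcast : ((k : Int) + 1) = ((k + 1 : Nat) : Int) := by push_cast; ring
      rw [hcast, ih (acc ++ [PySem.List.pyGetD ps (k : Int) 0]) (k + 1)]
      have hget : PySem.List.pyGetD ps (k : Int) 0 = (ps.drop k).headI := by
        rw [PySem.List.pyGetD_natCast, getD_eq_headI_drop]
      have htail : ps.drop (k + 1) = (ps.drop k).tail := by
        rw [List.tail_drop]
      rw [hget, htail]
      simp [altConsume, hx]

-- A in closed form
theorem sortAvoidNegativeNum_eq (arr : List Int) :
    sortAvoidNegativeNum arr
      = altConsume arr (bubbleSortA (arr.filter (fun x => decide (x ≥ 0)))) := by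
  unfold sortAvoidNegativeNum
  rw [posfold_eq_filter]
  simp only [List.nil_append]
  have := mergefold_eq_altConsume arr (bubbleSortA (arr.filter (fun x => decide (x ≥ 0)))) [] 0
  simpa using this

-- the bubble sort equals Python's sorted with the identity key
theorem bubbleSortA_eq_sorted (l : List Int) :
    bubbleSortA l = PySem.List.sorted l (fun x => x) false := by
  rw [bubbleSortA_eq_bsortN]
  have hperm : (bsortN l.length l).Perm l := perm_bsortN l.length l
  have hsorted : (bsortN l.length l).Pairwise (· ≤ ·) :=
    bsortN_sorted l.length l ⟨by simp, by intro x hx y hy; simp at hy⟩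
  exact (PySem.List.sorted_id_eq_of_perm_of_pairwise l (bsortN l.length l) hperm hsorted).symm

-- ---------- B-side ----------

-- insNN at the value level: insert c into the list of values carried by the non-negative slots
def insC : Int → List Int → List Int
  | c, [] => [c]
  | c, y :: t => if c < y then c :: insC y t else y :: insC c t

-- the value-level fold matching B's outer loop
def valFold (t : List Int) (s : List Int) : List Int :=
  t.foldl (fun s x => if x < 0 then s else insC x s) s

-- altConsume only reads the sign of the template's entries
def maskNN (l : List Int) : List Int := l.map (fun x => if x < 0 then x else 0)

theorem altConsume_mask (p s : List Int) : altConsume (maskNN p) s = altConsume p s := by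
  induction p generalizing s with
  | nil => rfl
  | cons x t ih =>
    by_cases hx : x < 0
    · simp [maskNN, altConsume, hx, ih] at *
      simp [List.map, hx, altConsume, ih]
    · simp only [maskNN, List.map_cons] at *
      rw [if_neg hx]
      simp only [altConsume]
      rw [if_neg (by omega : ¬ (0:Int) < 0), if_neg hx]
      exact congrArg _ (ih s.tail)

theorem altConsume_append_neg (p s : List Int) (x : Int) (hx : x < 0) :
    altConsume (p ++ [x]) s = altConsume p s ++ [x] := by
  induction p generalizing s with
  | nil => simp [altConsume, hx]
  | cons z t ih =>
    by_cases hz : z < 0 <;> simp [altConsume, hz, ih]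

-- one insertion step of B, reduced to the value level
theorem insNN_altConsume (p s : List Int) (c : Int)
    (hs : ∀ y ∈ s, 0 ≤ y) (hc : 0 ≤ c)
    (hl : s.length = p.countP (fun x => decide (x ≥ 0))) :
    insNN (altConsume p s) c = altConsume (p ++ [0]) (insC c s) := by
  induction p generalizing s c with
  | nil =>
    have : s = [] := List.eq_nil_of_length_eq_zero (by simpa using hl)
    subst this
    simp [altConsume, insNN, insC, hc]
  | cons z t ih =>
    by_cases hz : z < 0
    · have hcnt : s.length = t.countP (fun x => decide (x ≥ 0)) := by
        rw [hl, List.countP_cons]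
        simp [show ¬ z ≥ 0 by omega]
      simp only [altConsume, if_pos hz, List.cons_append, insNN]
      rw [if_neg (by omega), ih s c hs hc hcnt]
    · have hz' : (0:Int) ≤ z := by omega
      match s, hl with
      | y :: s', hl =>
        have hy : 0 ≤ y := hs y (by simp)
        have hs' : ∀ u ∈ s', 0 ≤ u := fun u hu => hs u (by simp [hu])
        have hcnt : s'.length = t.countP (fun x => decide (x ≥ 0)) := by
          have := hl
          rw [List.countP_cons] at this
          simp [show z ≥ 0 from hz'] at this
          simpa using this
        simp only [altConsume, if_neg hz, List.headI, List.tail_cons, insNN, List.cons_append]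
        by_cases hcy : c < y
        · rw [if_pos ⟨hy, hcy⟩, ih s' y hs' hy hcnt]
          simp [insC, hcy, altConsume, hz]
        · rw [if_neg (by tauto), ih s' c hs' hc hcnt]
          simp [insC, hcy, altConsume, hz]
      | [], hl =>
        exfalso
        rw [List.countP_cons] at hl
        simp [show z ≥ 0 from hz'] at hl

-- insC: permutation, sortedness, sign, length
theorem insC_perm (c : Int) (s : List Int) : (insC c s).Perm (c :: s) := by
  induction s generalizing c with
  | nil => simp [insC]
  | cons y t ih =>
    simp only [insC]
    split
    · exact (ih y).cons c
    · exact ((ih c).cons y).trans (List.Perm.swap c y t)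

theorem insC_sorted (c : Int) (s : List Int) (h : s.Pairwise (· ≤ ·)) :
    (insC c s).Pairwise (· ≤ ·) := by
  induction s generalizing c with
  | nil => simp [insC]
  | cons y t ih =>
    have hyt : ∀ z ∈ t, y ≤ z := fun z hz => (List.pairwise_cons.1 h).1 z hz
    have ht : t.Pairwise (· ≤ ·) := (List.pairwise_cons.1 h).2
    simp only [insC]
    split
    · rename_i hcy
      refine List.pairwise_cons.2 ⟨?_, ih y ht⟩
      intro z hz
      rcases List.mem_cons.1 (((insC_perm y t).mem_iff).1 hz) with h' | h'
      · omega
      · exact le_trans (le_of_lt hcy) (hyt z h')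
    · rename_i hcy
      refine List.pairwise_cons.2 ⟨?_, ih c ht⟩
      intro z hz
      rcases List.mem_cons.1 (((insC_perm c t).mem_iff).1 hz) with h' | h'
      · omega
      · exact hyt z h'

-- the value fold keeps: a permutation of s ++ filter, sortedness, non-negativity
theorem valFold_cons (x : Int) (r s : List Int) :
    valFold (x :: r) s = if x < 0 then valFold r s else valFold r (insC x s) := by
  by_cases hx : x < 0 <;> simp [valFold, hx]

theorem valFold_perm (t s : List Int) :
    (valFold t s).Perm (s ++ t.filter (fun x => decide (x ≥ 0))) := by
  induction t generalizing s with
  | nil => simp [valFold]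
  | cons x r ih =>
    rw [valFold_cons]
    by_cases hx : x < 0
    · rw [if_pos hx, List.filter_cons_of_neg (by simpa using (by omega : ¬ x ≥ 0))]
      exact ih s
    · rw [if_neg hx, List.filter_cons_of_pos (by simpa using (by omega : x ≥ 0))]
      have h1 := ih (insC x s)
      have h2 : (insC x s ++ r.filter (fun y => decide (y ≥ 0))).Perm
          (s ++ x :: r.filter (fun y => decide (y ≥ 0))) :=
        ((insC_perm x s).append_right _).trans List.perm_middle.symm
      exact h1.trans h2

theorem valFold_sorted (t s : List Int) (h : s.Pairwise (· ≤ ·)) :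
    (valFold t s).Pairwise (· ≤ ·) := by
  induction t generalizing s with
  | nil => simpa [valFold]
  | cons x r ih =>
    by_cases hx : x < 0
    · simpa [valFold, List.foldl_cons, hx] using ih s h
    · simpa [valFold, List.foldl_cons, hx] using ih (insC x s) (insC_sorted x s h)

-- B's outer loop, reduced to the closed form
theorem foldB (t : List Int) : ∀ (p s : List Int),
    (∀ y ∈ s, 0 ≤ y) → s.length = p.countP (fun x => decide (x ≥ 0)) →
    t.foldl (fun res x => if x < 0 then res ++ [x] else insNN res x) (altConsume p s)
      = altConsume (p ++ t) (valFold t s) := by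
  induction t with
  | nil => intro p s _ _; simp [valFold]
  | cons x r ih =>
    intro p s hs hl
    by_cases hx : x < 0
    · simp only [List.foldl_cons, if_pos hx]
      rw [altConsume_append_neg p s x hx |>.symm]
      have hl' : s.length = (p ++ [x]).countP (fun y => decide (y ≥ 0)) := by
        rw [List.countP_append, hl]
        simp [show ¬ x ≥ 0 by omega]
      rw [ih (p ++ [x]) s hs hl']
      have : valFold (x :: r) s = valFold r s := by simp [valFold, hx]
      rw [this, List.append_assoc]
      rfl
    · simp only [List.foldl_cons, if_neg hx]
      rw [insNN_altConsume p s x hs (by omega) hl]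
      have hs' : ∀ y ∈ insC x s, 0 ≤ y := by
        intro y hy
        rcases List.mem_cons.1 (((insC_perm x s).mem_iff).1 hy) with h | h
        · omega
        · exact hs y h
      have hl' : (insC x s).length = (p ++ [(0:Int)]).countP (fun y => decide (y ≥ 0)) := by
        have : (insC x s).length = s.length + 1 := by
          simpa using (insC_perm x s).length_eq
        rw [this, List.countP_append, hl]
        simp
      rw [ih (p ++ [0]) (insC x s) hs' hl']
      have hmask : altConsume ((p ++ [0]) ++ r) (valFold r (insC x s))
          = altConsume (p ++ x :: r) (valFold r (insC x s)) := by
        rw [← altConsume_mask ((p ++ [0]) ++ r), ← altConsume_mask (p ++ x :: r)]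
        congr 1
        simp [maskNN, hx]
      rw [hmask]
      have : valFold (x :: r) s = valFold r (insC x s) := by simp [valFold, hx]
      rw [this]

-- B in closed form
theorem sortAvoidNegativeNum_alt_eq (arr : List Int) :
    sortAvoidNegativeNum_alt arr
      = altConsume arr (PySem.List.sorted (arr.filter (fun x => decide (x ≥ 0))) (fun x => x) false) := by
  unfold sortAvoidNegativeNum_alt
  have hF : arr.foldl (fun res x => if x < 0 then res ++ [x] else insNN res x) []
      = altConsume arr (valFold arr []) := by
    have := foldB arr [] [] (by intro y hy; simp at hy) (by simp)
    simpa [altConsume] using this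
  rw [hF]
  congr 1
  have hperm : (valFold arr []).Perm (arr.filter (fun x => decide (x ≥ 0))) := by
    simpa using valFold_perm arr []
  have hsorted : (valFold arr []).Pairwise (· ≤ ·) := valFold_sorted arr [] (by simp)
  exact (PySem.List.sorted_id_eq_of_perm_of_pairwise _ _ hperm hsorted).symm

-- ===== VERDICT (by name: the statement is the Claim_ definition above) =====
theorem sortAvoidNegativeNum_spec : Claim_equal_sortAvoidNegativeNum := by
  intro arr _
  unfold Spec_sortAvoidNegativeNum
  rw [sortAvoidNegativeNum_eq, bubbleSortA_eq_sorted, sortAvoidNegativeNum_alt_eq]
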